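-- pv_equiv track=rewrite | github.com/DavidSegalle/Comunicacao_de_Dados | cipher.py | encode_2b1q
-- ===== SOURCE A (Python) =====
-- from typing import List
--
-- def encode_2b1q(binary: List[int]):
--     # Converte dados digitais para sinal digital.
--     signal = []
--     if len(binary) % 2 == 1:
--         binary.append(0)
--     for i in range(0, len(binary), 2):
--         el = (binary[i] << 1) + binary[i + 1]
--         if el == 0 or el == 2:
--             signal.append(1)
--         else:
--             signal.append(3)
--         if el >= 2:
--             signal[-1] *= -1
--         if len(signal) > 1 and signal[-2] < 0:
--             signal[-1] *= -1
--     return signal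
-- ===== SOURCE B (Python) =====
-- from typing import List
--
-- def encode_2b1q(binary: List[int]):
--     # Run decomposition: split the pair values at the polarity-flip positions
--     # and emit whole alternating-sign runs, instead of A's per-element pass
--     # that reads back and mutates the previously appended output element.
--     if len(binary) % 2 == 1:
--         binary.append(0)
--     els = [(binary[i] << 1) + binary[i + 1] for i in range(0, len(binary), 2)]
--     mags = [1 if e == 0 or e == 2 else 3 for e in els]
--     flips = [i for i, e in enumerate(els) if e >= 2]
--     bounds = flips + [len(els)]
--     out = mags[:bounds[0]]
--     for k, (lo, hi) in enumerate(zip(flips, bounds[1:])):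
--         seg = mags[lo:hi]
--         out += seg if k % 2 else [-x for x in seg]
--     return out
-- ===== Notes on version B (the rewrite author's own statement) =====
-- stated objective: alternative
-- what changed: B uses a run decomposition: it computes the pair values, finds the polarity-flip positions, splits the magnitude list into runs at those positions and emits whole runs with alternating sign, instead of A's stateful per-element pass that reads back and mutates the previously appended output element.
import Mathlib
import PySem

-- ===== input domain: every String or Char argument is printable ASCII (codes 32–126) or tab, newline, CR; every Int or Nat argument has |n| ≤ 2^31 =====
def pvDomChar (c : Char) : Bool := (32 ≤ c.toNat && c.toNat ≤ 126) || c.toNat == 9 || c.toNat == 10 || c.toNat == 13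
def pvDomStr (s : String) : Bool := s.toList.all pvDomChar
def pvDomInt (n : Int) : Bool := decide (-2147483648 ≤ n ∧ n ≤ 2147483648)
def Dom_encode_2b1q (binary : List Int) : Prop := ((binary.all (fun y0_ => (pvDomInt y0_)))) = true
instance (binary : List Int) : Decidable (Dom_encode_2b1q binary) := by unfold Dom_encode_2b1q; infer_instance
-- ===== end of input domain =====

-- B re-derives the signal by run decomposition (split the magnitudes at the polarity-flip
-- positions, emit alternating-sign runs) instead of A's per-element pass that reads back
-- the previously appended output element; equal return value
-- (A also mutates its argument in place when the length is odd — return value only is compared).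

-- ===== PORT A =====
-- signal[-1] *= -1  (the loop body guarantees signal ≠ [], so the default is never used)
def pvNegLast (l : List Int) : List Int := l.dropLast ++ [-(PySem.List.pyGetD l (-1) 0)]

-- one iteration of A's loop body, given el = (binary[i] << 1) + binary[i + 1]
def pvStepA (signal : List Int) (el : Int) : List Int :=
  let signal := if el = 0 ∨ el = 2 then signal ++ [1] else signal ++ [3]
  let signal := if 2 ≤ el then pvNegLast signal else signal
  if 1 < signal.length ∧ PySem.List.pyGetD signal (-2) 0 < 0 then pvNegLast signal else signal

-- (binary[i] << 1) on a Python int is exactly 2 * binary[i]; the indices produced by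
-- range(0, len, 2) with the padded even length are always in range, so pyGetD's default is dead.
def encode_2b1q (binary : List Int) : List Int :=
  let b := if binary.length % 2 = 1 then binary ++ [0] else binary
  (PySem.List.pyRange 0 b.length 2).foldl
    (fun signal i => pvStepA signal (2 * PySem.List.pyGetD b i 0 + PySem.List.pyGetD b (i + 1) 0))
    []

-- ===== PORT B =====
-- 1 if e == 0 or e == 2 else 3
def pvMag (e : Int) : Int := if e = 0 ∨ e = 2 then 1 else 3

-- [i for i, e in enumerate(xs, s) if e >= 2]
def pvFlips (xs : List Int) (s : Int) : List Int :=
  ((PySem.List.enumerate xs s).filter (fun p => 2 ≤ p.2)).map (·.1)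

def encode_2b1q_alt (binary : List Int) : List Int :=
  let b := if binary.length % 2 = 1 then binary ++ [0] else binary
  let els := (PySem.List.pyRange 0 b.length 2).map
    (fun i => 2 * PySem.List.pyGetD b i 0 + PySem.List.pyGetD b (i + 1) 0)
  let mags := els.map pvMag
  let flips := pvFlips els 0
  let bounds := flips ++ [(els.length : Int)]
  -- out = mags[:bounds[0]]  (bounds is nonempty, so the pyGetD default is dead)
  let out := PySem.List.slice mags none (some (PySem.List.pyGetD bounds 0 0))
  -- for k, (lo, hi) in enumerate(zip(flips, bounds[1:])): out += seg if k % 2 else [-x for x in seg]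
  (PySem.List.enumerate (flips.zip (PySem.List.slice bounds (some 1) none)) 0).foldl
    (fun out kp =>
      out ++ (if PySem.Int.mod kp.1 2 ≠ 0
              then PySem.List.slice mags (some kp.2.1) (some kp.2.2)
              else (PySem.List.slice mags (some kp.2.1) (some kp.2.2)).map (fun x => -x)))
    out

-- ===== PRECONDITION & SPEC =====
def Spec_encode_2b1q (binary : List Int) (out : List Int) : Prop := out = encode_2b1q_alt binary
instance (binary : List Int) (out : List Int) : Decidable (Spec_encode_2b1q binary out) := by unfold Spec_encode_2b1q; infer_instance

-- ===== CLAIM (what is proved, stated in full; the proofs are below) =====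
def Claim_equal_encode_2b1q : Prop := ∀ (binary : List Int), Dom_encode_2b1q binary → Spec_encode_2b1q binary (encode_2b1q binary)

-- ===== LEMMAS AND PROOFS =====

-- the common reference: per-pair output with the running sign (proof-side only)
def pvGoB : List Int → Int → List Int
  | [], _ => []
  | el :: rest, sign =>
    let sign := if 2 ≤ el then -sign else sign
    (if el = 0 ∨ el = 2 then sign else 3 * sign) :: pvGoB rest sign

-- ---- A-side: the fold of pvStepA is pvGoB with sign 1 ----

theorem pvNegLast_concat (l : List Int) (x : Int) : pvNegLast (l ++ [x]) = l ++ [-x] := by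
  simp [pvNegLast, PySem.List.pyGetD_neg_one_append_singleton]

theorem pvNegLast_singleton (x : Int) : pvNegLast [x] = [-x] := by
  simpa using pvNegLast_concat [] x

theorem pvNegLast_pair (l : List Int) (x y : Int) : pvNegLast (l ++ [x, y]) = l ++ [x, -y] := by
  have h := pvNegLast_concat (l ++ [x]) y
  simpa using h

theorem pvGetD_neg_two (l : List Int) (x y : Int) :
    PySem.List.pyGetD (l ++ [x, y]) (-2) 0 = x := by
  have h : l ++ [x, y] = (l ++ [x]) ++ [y] := by simp
  rw [h, PySem.List.pyGetD_neg_ofNat _ 2 0 (by omega) (by simp)]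
  simp

-- loop invariant: the accumulated signal's last element has the sign recorded by `sign`
theorem pv_aux (ps : List Int) : ∀ (acc : List Int) (sign : Int),
    ((acc = [] ∧ sign = 1) ∨
      ∃ l x, acc = l ++ [x] ∧ ((x < 0 ∧ sign = -1) ∨ (0 < x ∧ sign = 1))) →
    ps.foldl pvStepA acc = acc ++ pvGoB ps sign := by
  induction ps with
  | nil => intro acc sign _; simp [pvGoB]
  | cons el ps ih =>
    intro acc sign h
    have hstep : ∃ v, pvStepA acc el = acc ++ [v] ∧
        v = (if el = 0 ∨ el = 2 then (1 : Int) else 3) * (if 2 ≤ el then -sign else sign) := by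
      rcases h with ⟨rfl, rfl⟩ | ⟨l, x, rfl, hx⟩
      · refine ⟨_, ?_, rfl⟩
        by_cases h02 : el = 0 ∨ el = 2 <;> by_cases h2 : 2 ≤ el <;>
          simp [pvStepA, h02, h2, pvNegLast_singleton]
      · refine ⟨_, ?_, rfl⟩
        rcases hx with ⟨h1, rfl⟩ | ⟨h1, rfl⟩
        · by_cases h02 : el = 0 ∨ el = 2 <;> by_cases h2 : 2 ≤ el <;>
            simp [pvStepA, h02, h2, pvNegLast_pair, pvGetD_neg_two, List.length_append, h1]
        · have h1' : ¬ x < 0 := by omega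
          by_cases h02 : el = 0 ∨ el = 2 <;> by_cases h2 : 2 ≤ el <;>
            simp [pvStepA, h02, h2, pvNegLast_pair, pvGetD_neg_two, List.length_append, h1']
    rcases hstep with ⟨v, hv, hvdef⟩
    have h02' : (0:Int) < (if el = 0 ∨ el = 2 then (1 : Int) else 3) := by split <;> omega
    have hsign' : (v < 0 ∧ (if 2 ≤ el then -sign else sign) = -1) ∨
        (0 < v ∧ (if 2 ≤ el then -sign else sign) = 1) := by
      have hs : sign = 1 ∨ sign = -1 := by
        rcases h with ⟨_, rfl⟩ | ⟨l, x, _, hx⟩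
        · left; rfl
        · rcases hx with ⟨_, rfl⟩ | ⟨_, rfl⟩ <;> simp
      rcases hs with rfl | rfl <;> by_cases h2 : 2 ≤ el <;>
        simp [hvdef, h2] <;> split <;> omega
    have := ih (acc ++ [v]) (if 2 ≤ el then -sign else sign)
      (Or.inr ⟨acc, v, rfl, hsign'⟩)
    calc (el :: ps).foldl pvStepA acc = ps.foldl pvStepA (acc ++ [v]) := by
          simp [List.foldl_cons, hv]
      _ = acc ++ [v] ++ pvGoB ps (if 2 ≤ el then -sign else sign) := this
      _ = acc ++ pvGoB (el :: ps) sign := by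
          simp [pvGoB, hvdef, mul_comm]

-- ---- B-side: the run decomposition is pvGoB with sign 1 ----

def pvFlipSign (xs : List Int) (s : Int) : Int :=
  if xs.countP (fun e => decide (2 ≤ e)) % 2 = 0 then s else -s

theorem pvFlipSign_cons (e : Int) (xs : List Int) (s : Int) :
    pvFlipSign (e :: xs) s = pvFlipSign xs (if 2 ≤ e then -s else s) := by
  by_cases h : 2 ≤ e
  · simp [pvFlipSign, h]
    split_ifs <;> first | rfl | omega
  · simp [pvFlipSign, h]

theorem pvGoB_append (xs ys : List Int) (s : Int) :
    pvGoB (xs ++ ys) s = pvGoB xs s ++ pvGoB ys (pvFlipSign xs s) := by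
  induction xs generalizing s with
  | nil => simp [pvGoB, pvFlipSign]
  | cons e xs ih =>
    simp only [List.cons_append, pvGoB, ih, pvFlipSign_cons, List.cons_append]

theorem pvGoB_noflip (xs : List Int) (s : Int) (h : ∀ e ∈ xs, ¬ 2 ≤ e) :
    pvGoB xs s = xs.map (fun e => pvMag e * s) := by
  induction xs generalizing s with
  | nil => simp [pvGoB]
  | cons e xs ih =>
    have he := h e (by simp)
    have hrest : ∀ x ∈ xs, ¬ 2 ≤ x := fun x hx => h x (by simp [hx])
    rw [List.map_cons, ← ih s hrest]
    by_cases h02 : e = 0 ∨ e = 2 <;> simp [pvGoB, he, h02, pvMag]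

theorem pvGoB_flip_head (e : Int) (xs : List Int) (s : Int) (he : 2 ≤ e)
    (h : ∀ x ∈ xs, ¬ 2 ≤ x) :
    pvGoB (e :: xs) s = (e :: xs).map (fun x => pvMag x * (-s)) := by
  by_cases h02 : e = 0 ∨ e = 2 <;>
    simp [pvGoB, he, h02, pvMag, pvGoB_noflip xs (-s) h]

theorem pvFlips_nil (s : Int) : pvFlips [] s = [] := by
  simp [pvFlips, PySem.List.enumerate_nil]

theorem pvFlips_cons (e : Int) (xs : List Int) (s : Int) :
    pvFlips (e :: xs) s =
      if 2 ≤ e then s :: pvFlips xs (s + 1) else pvFlips xs (s + 1) := by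
  by_cases h : 2 ≤ e <;> simp [pvFlips, PySem.List.enumerate_cons, h]

theorem pvFlips_eq_nil (xs : List Int) (s : Int) (h : pvFlips xs s = []) :
    ∀ e ∈ xs, ¬ 2 ≤ e := by
  induction xs generalizing s with
  | nil => simp
  | cons a xs ih =>
    rw [pvFlips_cons] at h
    by_cases ha : 2 ≤ a
    · simp [ha] at h
    · simp [ha] at h
      intro e he
      rcases List.mem_cons.1 he with rfl | he'
      · exact ha
      · exact ih (s + 1) h e he'

theorem pvFlips_eq_cons (xs : List Int) (s : Int) (f : Int) (rest : List Int)
    (h : pvFlips xs s = f :: rest) :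
    ∃ pre e suf, xs = pre ++ e :: suf ∧ (∀ x ∈ pre, ¬ 2 ≤ x) ∧ 2 ≤ e ∧
      f = s + pre.length ∧ rest = pvFlips suf (f + 1) := by
  induction xs generalizing s f rest with
  | nil => simp [pvFlips_nil] at h
  | cons a xs ih =>
    rw [pvFlips_cons] at h
    by_cases ha : 2 ≤ a
    · rw [if_pos ha] at h
      obtain ⟨rfl, rfl⟩ := List.cons.inj h
      exact ⟨[], a, xs, by simp, by simp, ha, by simp, rfl⟩
    · rw [if_neg ha] at h
      obtain ⟨pre, e, suf, hxs, hpre, he, hf, hrest⟩ := ih (s + 1) f rest h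
      refine ⟨a :: pre, e, suf, by simp [hxs], ?_, he, ?_, hrest⟩
      · intro x hx
        rcases List.mem_cons.1 hx with rfl | hx'
        · exact ha
        · exact hpre x hx'
      · simp [hf]; ring

-- slicing the magnitude list at a decomposition point extracts the segment's magnitudes
theorem pvSlice_seg (els pre seg rest : List Int) (h : els = pre ++ (seg ++ rest)) :
    PySem.List.slice (els.map pvMag) (some (pre.length : Int))
      (some ((pre.length : Int) + (seg.length : Int))) = seg.map pvMag := by
  subst h
  rw [PySem.List.slice_natCast_add]
  simp [List.map_append, List.drop_left', List.take_left']

-- the value B appends for one run equals pvGoB of that run at the current sign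
theorem pvStepVal (pre seg : List Int) (k : Nat) (e : Int) (tl : List Int)
    (hseg : seg = e :: tl) (he : 2 ≤ e) (hfree : ∀ x ∈ tl, ¬ 2 ≤ x)
    (hk : pre.countP (fun e => decide (2 ≤ e)) = k) :
    (if PySem.Int.mod (k : Int) 2 ≠ 0 then seg.map pvMag
     else (seg.map pvMag).map (fun x => -x)) = pvGoB seg (pvFlipSign pre 1) := by
  subst hseg
  have hmod : PySem.Int.mod (k : Int) 2 = ((k % 2 : Nat) : Int) := by
    exact_mod_cast PySem.Int.mod_natCast k 2
  rw [pvGoB_flip_head e tl _ he hfree]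
  unfold pvFlipSign
  rw [hk]
  by_cases hp : k % 2 = 0
  · have hc : ¬ (PySem.Int.mod (k : Int) 2 ≠ 0) := by rw [hmod, hp]; simp
    rw [if_neg hc, if_pos hp]
    simp [List.map_map, Function.comp_def]
  · have h1 : k % 2 = 1 := by omega
    have hc : PySem.Int.mod (k : Int) 2 ≠ 0 := by rw [hmod, h1]; simp
    rw [if_pos hc, if_neg hp]
    simp [neg_neg, mul_one]

-- the main fold invariant for B's run loop
theorem pvMain (els : List Int) : ∀ (m : Nat) (suf pre : List Int) (k : Nat),
    suf.length = m →
    els = pre ++ suf →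
    pre.countP (fun e => decide (2 ≤ e)) = k →
    (suf = [] ∨ ∃ e s', suf = e :: s' ∧ 2 ≤ e) →
    (PySem.List.enumerate
        ((pvFlips suf (pre.length : Int)).zip
          ((pvFlips suf (pre.length : Int)).tail ++ [(els.length : Int)])) (k : Int)).foldl
      (fun out kp =>
        out ++ (if PySem.Int.mod kp.1 2 ≠ 0
                then PySem.List.slice (els.map pvMag) (some kp.2.1) (some kp.2.2)
                else (PySem.List.slice (els.map pvMag) (some kp.2.1) (some kp.2.2)).map
                  (fun x => -x)))
      (pvGoB pre 1)
    = pvGoB els 1 := by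
  intro m
  induction m using Nat.strong_induction_on with
  | _ m ih =>
  intro suf pre k hm hels hk hshape
  rcases hshape with rfl | ⟨e, s', rfl, he⟩
  · subst hels
    rw [pvFlips_nil]
    simp [PySem.List.enumerate_nil]
  · subst hels
    rw [pvFlips_cons, if_pos he]
    cases hT : pvFlips s' ((pre.length : Int) + 1) with
    | nil =>
      have hfree : ∀ x ∈ s', ¬ 2 ≤ x := pvFlips_eq_nil s' _ hT
      simp only [List.tail_cons, List.nil_append, List.zip_cons_cons, List.zip_nil_right, PySem.List.enumerate_cons, PySem.List.enumerate_nil,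
        List.foldl_cons, List.foldl_nil]
      have hb : (((pre ++ e :: s').length : Nat) : Int)
          = (pre.length : Int) + (((e :: s').length : Nat) : Int) := by
        push_cast [List.length_append]
        ring
      rw [hb, pvSlice_seg _ pre (e :: s') [] (by simp),
        pvStepVal pre (e :: s') k e s' rfl he hfree hk, ← pvGoB_append]
    | cons t T' =>
      obtain ⟨pre2, e2, suf2, hs', hpre2, he2, ht, hT'⟩ := pvFlips_eq_cons s' _ t T' hT
      subst hs'
      simp only [List.tail_cons, List.cons_append, List.zip_cons_cons,
        PySem.List.enumerate_cons, List.foldl_cons]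
      have ht' : t = (pre.length : Int) + (((e :: pre2).length : Nat) : Int) := by
        rw [ht]; push_cast [List.length_cons]; ring
      rw [ht', pvSlice_seg _ pre (e :: pre2) (e2 :: suf2) (by simp),
        pvStepVal pre (e :: pre2) k e pre2 rfl he hpre2 hk, ← pvGoB_append]
      have hz : pre2.countP (fun e => decide (2 ≤ e)) = 0 :=
        List.countP_eq_zero.2 (by intro x hx; simpa using hpre2 x hx)
      have hk' : (pre ++ e :: pre2).countP (fun e => decide (2 ≤ e)) = k + 1 := by
        simp [List.countP_append, hz, he, hk]
      have hlt : (e2 :: suf2).length < m := by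
        simp only [List.length_cons, List.length_append] at hm ⊢; omega
      have hIH := ih (e2 :: suf2).length hlt (e2 :: suf2) (pre ++ e :: pre2) (k + 1) rfl
        (by simp) hk' (Or.inr ⟨e2, suf2, rfl, he2⟩)
      have hlen : (((pre ++ e :: pre2).length : Nat) : Int) = t := by
        rw [ht]; push_cast [List.length_append, List.length_cons]; ring
      rw [pvFlips_cons, if_pos he2, hlen] at hIH
      have hcast : ((k : Int) + 1) = ((k + 1 : Nat) : Int) := by push_cast; ring
      rw [hcast, ← ht', hT']
      exact hIH

-- top level: B's run decomposition over the pair values els equals pvGoB els 1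
theorem pvRunB (els : List Int) :
    (PySem.List.enumerate
        ((pvFlips els 0).zip
          (PySem.List.slice ((pvFlips els 0) ++ [(els.length : Int)]) (some 1) none)) 0).foldl
      (fun out kp =>
        out ++ (if PySem.Int.mod kp.1 2 ≠ 0
                then PySem.List.slice (els.map pvMag) (some kp.2.1) (some kp.2.2)
                else (PySem.List.slice (els.map pvMag) (some kp.2.1) (some kp.2.2)).map
                  (fun x => -x)))
      (PySem.List.slice (els.map pvMag) none
        (some (PySem.List.pyGetD ((pvFlips els 0) ++ [(els.length : Int)]) 0 0)))
    = pvGoB els 1 := by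
  rw [PySem.List.slice_from_one]
  cases hF : pvFlips els 0 with
  | nil =>
    have hfree : ∀ x ∈ els, ¬ 2 ≤ x := pvFlips_eq_nil els 0 hF
    simp only [List.nil_append, List.tail_cons, PySem.List.pyGetD_zero_cons]
    rw [PySem.List.slice_to_natCast]
    simp [PySem.List.enumerate_nil, pvGoB_noflip els 1 hfree]
  | cons f rest =>
    obtain ⟨pre, e, suf, hels, hpre, he, hf, hrest⟩ := pvFlips_eq_cons els 0 f rest hF
    simp only [List.cons_append, List.tail_cons, PySem.List.pyGetD_zero_cons]
    have hf' : f = ((pre.length : Nat) : Int) := by rw [hf]; ring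
    have hinit : PySem.List.slice (els.map pvMag) none (some f) = pvGoB pre 1 := by
      rw [hf', PySem.List.slice_to_natCast, hels]
      rw [pvGoB_noflip pre 1 hpre]
      simp [List.map_append, List.take_left']
    rw [hinit]
    have hMain := pvMain els (e :: suf).length (e :: suf) pre 0 rfl hels
      (List.countP_eq_zero.2 (by intro x hx; simpa using hpre x hx))
      (Or.inr ⟨e, suf, rfl, he⟩)
    rw [pvFlips_cons, if_pos he] at hMain
    rw [← hf'] at hMain
    rw [← hrest] at hMain
    simpa using hMain


-- ===== VERDICT (by name: the statement is the Claim_ definition above) =====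
theorem encode_2b1q_spec : Claim_equal_encode_2b1q := by
  intro binary _
  unfold Spec_encode_2b1q encode_2b1q encode_2b1q_alt
  rw [← List.foldl_map, pvRunB]
  exact pv_aux _ [] 1 (Or.inl ⟨rfl, rfl⟩)
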